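-- pv_equiv track=rewrite | github.com/913-guia-alex/UBB_Projects | Year3/Sem1/LimbajeFormaleSiTehniciDeCompilare/Lab23LFTC/CryptoA3.py | letters_to_num_de
-- ===== SOURCE A (Python) =====
-- def letters_to_num_de(text):
--     number = 0
--     for i, char in enumerate(reversed(text)):
--         if char == '_':
--             coefficient = 0
--         else:
--             coefficient = ord(char.upper()) - ord('A') + 1
--         number += coefficient * (27 ** i)
--     return number
-- ===== SOURCE B (Python) =====
-- def letters_to_num_de(text):
--     number = 0
--     for char in text:
--         number = number * 27 + (0 if char == '_' else ord(char.upper()) - ord('A') + 1)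
--     return number
-- ===== Notes on version B (the rewrite author's own statement) =====
-- stated objective: faster
-- what changed: Replaces the reversed-enumerate loop that computes 27**i from scratch for each position with a single forward Horner pass (number = number*27 + coeff).
import Mathlib
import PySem

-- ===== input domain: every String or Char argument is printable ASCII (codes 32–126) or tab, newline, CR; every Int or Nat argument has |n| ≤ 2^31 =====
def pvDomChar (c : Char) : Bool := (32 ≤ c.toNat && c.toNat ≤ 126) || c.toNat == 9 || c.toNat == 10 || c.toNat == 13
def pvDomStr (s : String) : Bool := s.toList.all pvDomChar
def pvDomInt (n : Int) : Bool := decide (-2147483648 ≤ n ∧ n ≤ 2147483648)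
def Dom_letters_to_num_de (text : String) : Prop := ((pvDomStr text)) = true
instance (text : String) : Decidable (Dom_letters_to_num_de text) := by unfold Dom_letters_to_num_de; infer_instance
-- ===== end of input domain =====

-- B replaces the reversed-enumerate sum with 27**i recomputed per position by a single forward Horner pass (faster in a timing run).


-- ===== PORT A =====
-- coefficient of one character: 0 for '_', else ord(char.upper()) - ord('A') + 1
def pvCoeff (c : Char) : Int :=
  if c = '_' then 0 else ((PySem.Chars.upperChar c).toNat : Int) - 65 + 1

-- A: sum coefficient * 27**i over enumerate(reversed(text))
def letters_to_num_de (text : String) : Int :=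
  (PySem.List.enumerate text.toList.reverse 0).foldl
    (fun number p => number + pvCoeff p.2 * (27 : Int) ^ p.1.toNat) 0

-- ===== PORT B =====
-- B (Horner): one forward pass, number = number*27 + coeff
def letters_to_num_de_alt (text : String) : Int :=
  text.toList.foldl (fun number char => number * 27 + pvCoeff char) 0

-- ===== PRECONDITION & SPEC =====
def Spec_letters_to_num_de (text : String) (out : Int) : Prop := out = letters_to_num_de_alt text
instance (text : String) (out : Int) : Decidable (Spec_letters_to_num_de text out) := by unfold Spec_letters_to_num_de; infer_instance

-- ===== CLAIM (what is proved, stated in full; the proofs are below) =====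
def Claim_equal_letters_to_num_de : Prop := ∀ (text : String), Dom_letters_to_num_de text → Spec_letters_to_num_de text (letters_to_num_de text)

-- ===== LEMMAS AND PROOFS =====

-- Horner fold with general accumulator
theorem horner_acc (l : List Char) : ∀ (a : Int),
    l.foldl (fun number char => number * 27 + pvCoeff char) a
      = a * 27 ^ l.length + l.foldl (fun number char => number * 27 + pvCoeff char) 0 := by
  induction l with
  | nil => intro a; simp
  | cons c l ih =>
      intro a
      simp only [List.foldl_cons, List.length_cons]
      rw [ih (a * 27 + pvCoeff c), ih (0 * 27 + pvCoeff c)]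
      ring

-- A-side fold over an enumerate list with general accumulator
theorem enumA_acc (xs : List (Int × Char)) : ∀ (a : Int),
    xs.foldl (fun number p => number + pvCoeff p.2 * (27 : Int) ^ p.1.toNat) a
      = a + xs.foldl (fun number p => number + pvCoeff p.2 * (27 : Int) ^ p.1.toNat) 0 := by
  induction xs with
  | nil => intro a; simp
  | cons q xs ih =>
      intro a
      simp only [List.foldl_cons]
      rw [ih (a + pvCoeff q.2 * 27 ^ q.1.toNat), ih (0 + pvCoeff q.2 * 27 ^ q.1.toNat)]
      ring

theorem letters_to_num_de_lists (l : List Char) :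
    (PySem.List.enumerate l.reverse 0).foldl
        (fun number p => number + pvCoeff p.2 * (27 : Int) ^ p.1.toNat) 0
      = l.foldl (fun number char => number * 27 + pvCoeff char) 0 := by
  induction l with
  | nil => simp [PySem.List.enumerate]
  | cons c l ih =>
      rw [List.reverse_cons, PySem.List.enumerate_append, List.foldl_append, enumA_acc, ih,
        List.foldl_cons, horner_acc l (0 * 27 + pvCoeff c)]
      simp
      ring

-- ===== VERDICT (by name: the statement is the Claim_ definition above) =====
theorem letters_to_num_de_spec : Claim_equal_letters_to_num_de := by
  intro text _
  unfold Spec_letters_to_num_de letters_to_num_de letters_to_num_de_alt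
  exact letters_to_num_de_lists text.toList
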